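-- pv_equiv track=rewrite | github.com/SpicyMip/Lab1_AlgoritmosYComplejidad | main.py | cajasRotadas
-- ===== SOURCE A (Python) =====
-- def cajasRotadas(Tcajas):
--     Tpilas=[]
--     for pilas in Tcajas:
--         cajas2=[]
--         for cajas in pilas:
--             x,y,z=cajas
--             if (x,y,z) not in cajas2:
--                 cajas2.append((x,y,z))
--             newCaja=(x,z,y)
--             if newCaja not in cajas2:
--                 cajas2.append(newCaja)
--             newCaja=(y,z,x)
--             if newCaja not in cajas2:
--                 cajas2.append(newCaja)
--             newCaja=(y,x,z)
--             if newCaja not in cajas2: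
--                 cajas2.append(newCaja)
--             newCaja=(z,x,y)
--             if newCaja not in cajas2:
--                 cajas2.append(newCaja)
--             newCaja=(z,y,x)
--             if newCaja not in cajas2:
--                 cajas2.append(newCaja)
--         Tpilas.append(cajas2)
--     return Tpilas
-- ===== SOURCE B (Python) =====
-- def rotacionesDistintas(caja):
--     # Closed-form: the distinct rotations of a box, in A's first-seen order,
--     # depend only on which of its dimensions coincide (1, 3 or 6 of them).
--     x, y, z = caja
--     if x == y == z:
--         return [(x, x, x)]
--     if x == y:
--         return [(x, x, z), (x, z, x), (z, x, x)]
--     if x == z: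
--         return [(x, y, x), (x, x, y), (y, x, x)]
--     if y == z:
--         return [(x, y, y), (y, y, x), (y, x, y)]
--     return [(x, y, z), (x, z, y), (y, z, x), (y, x, z), (z, x, y), (z, y, x)]
--
--
-- def cajasRotadas(Tcajas):
--     Tpilas = []
--     for pilas in Tcajas:
--         res = []
--         seen = set()
--         for caja in pilas:
--             for r in rotacionesDistintas(caja):
--                 if r not in seen:
--                     seen.add(r)
--                     res.append(r)
--         Tpilas.append(res)
--     return Tpilas
-- ===== Notes on version B (the rewrite author's own statement) =====
-- stated objective: faster
-- what changed: A generates all six rotations of every box and dedupes each one by scanning the growing output list; B instead computes the distinct rotations of a box directly by a closed-form case analysis on which dimensions coincide (1, 3 or 6 rotations, no within-box dedup pass) and only filters cross-box collisions through a seen-set.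
import Mathlib
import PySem

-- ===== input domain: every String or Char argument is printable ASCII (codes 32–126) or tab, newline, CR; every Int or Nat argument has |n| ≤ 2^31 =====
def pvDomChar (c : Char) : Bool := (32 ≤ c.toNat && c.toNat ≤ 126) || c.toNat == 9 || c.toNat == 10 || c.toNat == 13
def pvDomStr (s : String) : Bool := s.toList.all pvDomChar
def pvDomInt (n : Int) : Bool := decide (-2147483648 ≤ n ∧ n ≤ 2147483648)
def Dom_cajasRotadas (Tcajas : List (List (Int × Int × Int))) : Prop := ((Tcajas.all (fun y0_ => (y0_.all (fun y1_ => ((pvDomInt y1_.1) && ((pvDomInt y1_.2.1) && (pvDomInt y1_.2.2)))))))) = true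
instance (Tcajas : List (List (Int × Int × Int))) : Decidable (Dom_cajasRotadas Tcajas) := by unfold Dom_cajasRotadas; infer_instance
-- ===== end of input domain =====

-- B replaces A's generate-6-then-dedupe per box by a closed-form case analysis
-- emitting the distinct rotations directly, plus a seen-set for cross-box collisions.

-- ===== PORT A =====
-- A: for each stack, one pass over the boxes, with six guarded appends per box
-- into the growing dedup list cajas2.
def cajasRotadas (Tcajas : List (List (Int × Int × Int))) : List (List (Int × Int × Int)) :=
  Tcajas.foldl (fun Tpilas pilas =>
    Tpilas ++ [pilas.foldl (fun cajas2 cajas =>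
      let x := cajas.1; let y := cajas.2.1; let z := cajas.2.2
      let c1 := if cajas2.contains (x, y, z) then cajas2 else cajas2 ++ [(x, y, z)]
      let c2 := if c1.contains (x, z, y) then c1 else c1 ++ [(x, z, y)]
      let c3 := if c2.contains (y, z, x) then c2 else c2 ++ [(y, z, x)]
      let c4 := if c3.contains (y, x, z) then c3 else c3 ++ [(y, x, z)]
      let c5 := if c4.contains (z, x, y) then c4 else c4 ++ [(z, x, y)]
      if c5.contains (z, y, x) then c5 else c5 ++ [(z, y, x)]) []]) []

-- ===== PORT B =====
-- B helper: the distinct rotations of one box, in first-seen order, by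
-- closed-form case analysis on which dimensions coincide.
def rotacionesDistintas (caja : Int × Int × Int) : List (Int × Int × Int) :=
  let x := caja.1; let y := caja.2.1; let z := caja.2.2
  if x = y ∧ y = z then [(x, x, x)]
  else if x = y then [(x, x, z), (x, z, x), (z, x, x)]
  else if x = z then [(x, y, x), (x, x, y), (y, x, x)]
  else if y = z then [(x, y, y), (y, y, x), (y, x, y)]
  else [(x, y, z), (x, z, y), (y, z, x), (y, x, z), (z, x, y), (z, y, x)]

-- B: per stack, keep (res, seen); each box contributes its distinct rotations,
-- filtered against the cross-box seen-set.
def cajasRotadas_alt (Tcajas : List (List (Int × Int × Int))) : List (List (Int × Int × Int)) :=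
  Tcajas.foldl (fun Tpilas pilas =>
    let st := pilas.foldl (fun (st : List (Int × Int × Int) × PySem.Set (Int × Int × Int)) caja =>
      (rotacionesDistintas caja).foldl (fun st r =>
        if PySem.Set.contains st.2 r then st else (st.1 ++ [r], PySem.Set.add st.2 r)) st)
      ([], PySem.Set.empty)
    Tpilas ++ [st.1]) []

-- ===== PRECONDITION & SPEC =====
def Spec_cajasRotadas (Tcajas : List (List (Int × Int × Int))) (out : List (List (Int × Int × Int))) : Prop := out = cajasRotadas_alt Tcajas
instance (Tcajas : List (List (Int × Int × Int))) (out : List (List (Int × Int × Int))) : Decidable (Spec_cajasRotadas Tcajas out) := by unfold Spec_cajasRotadas; infer_instance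

-- ===== CLAIM =====
def Claim_equal_cajasRotadas : Prop := ∀ (Tcajas : List (List (Int × Int × Int))), Dom_cajasRotadas Tcajas → Spec_cajasRotadas Tcajas (cajasRotadas Tcajas)

-- ===== LEMMAS AND PROOFS =====

-- A's six guarded appends for one box are the Set.add fold over that box's six rotations.
lemma boxStep_eq_add_fold (cajas2 : List (Int × Int × Int)) (cajas : Int × Int × Int) :
    (let x := cajas.1; let y := cajas.2.1; let z := cajas.2.2
     let c1 := if cajas2.contains (x, y, z) then cajas2 else cajas2 ++ [(x, y, z)]
     let c2 := if c1.contains (x, z, y) then c1 else c1 ++ [(x, z, y)]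
     let c3 := if c2.contains (y, z, x) then c2 else c2 ++ [(y, z, x)]
     let c4 := if c3.contains (y, x, z) then c3 else c3 ++ [(y, x, z)]
     let c5 := if c4.contains (z, x, y) then c4 else c4 ++ [(z, x, y)]
     if c5.contains (z, y, x) then c5 else c5 ++ [(z, y, x)]) =
    [(cajas.1, cajas.2.1, cajas.2.2), (cajas.1, cajas.2.2, cajas.2.1),
     (cajas.2.1, cajas.2.2, cajas.1), (cajas.2.1, cajas.1, cajas.2.2),
     (cajas.2.2, cajas.1, cajas.2.1), (cajas.2.2, cajas.2.1, cajas.1)].foldl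
      PySem.Set.add cajas2 := by
  simp [PySem.Set.add, PySem.Set.contains]

-- folding Set.add into acc = acc ++ (fold into []) filtered by not-in-acc
lemma add_fold_split {α : Type} [BEq α] [LawfulBEq α] (l : List α) (acc : List α) :
    l.foldl PySem.Set.add acc =
      acc ++ (l.foldl PySem.Set.add []).filter (fun x => ¬ acc.contains x) := by
  induction l generalizing acc with
  | nil => simp
  | cons r t ih =>
    simp only [List.foldl_cons]
    rw [ih (PySem.Set.add acc r), ih (PySem.Set.add [] r)]
    simp only [PySem.Set.add, PySem.Set.contains]
    by_cases hr : acc.contains r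
    · have hrm : r ∈ acc := by simpa using hr
      simp only [hr, if_pos]
      simp only [List.contains_nil, Bool.false_eq_true, if_false, List.nil_append]
      congr 1
      rw [List.filter_append, List.filter_filter]
      have hr1 : List.filter (fun x => decide ¬ acc.contains x) [r] = [] := by simp [hrm]
      rw [hr1, List.nil_append]
      apply List.filter_congr
      intro x _
      by_cases hxr : x = r
      · subst hxr; simp [hrm]
      · simp [hxr]
    · have hrm : r ∉ acc := by simpa using hr
      simp only [hr, Bool.false_eq_true, if_false]
      simp only [List.contains_nil, Bool.false_eq_true, if_false, List.nil_append]
      rw [List.filter_append, List.filter_filter]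
      have hr1 : List.filter (fun x => decide ¬ acc.contains x) [r] = [r] := by simp [hrm]
      rw [hr1]
      simp only [List.append_assoc, List.singleton_append]
      congr 2
      apply List.filter_congr
      intro x _
      by_cases hxr : x = r
      · subst hxr; simp [hrm]
      · simp [hxr]

-- hence only the deduped content of l matters when folding into any acc
lemma add_fold_congr {α : Type} [BEq α] [LawfulBEq α] {l₁ l₂ : List α}
    (h : l₁.foldl PySem.Set.add [] = l₂.foldl PySem.Set.add []) (acc : List α) :
    l₁.foldl PySem.Set.add acc = l₂.foldl PySem.Set.add acc := by
  rw [add_fold_split l₁, add_fold_split l₂, h]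

-- the closed-form distinct rotations are exactly the dedup of the six rotations
lemma rotacionesDistintas_eq (caja : Int × Int × Int) :
    [(caja.1, caja.2.1, caja.2.2), (caja.1, caja.2.2, caja.2.1),
     (caja.2.1, caja.2.2, caja.1), (caja.2.1, caja.1, caja.2.2),
     (caja.2.2, caja.1, caja.2.1), (caja.2.2, caja.2.1, caja.1)].foldl
      PySem.Set.add [] = (rotacionesDistintas caja).foldl PySem.Set.add [] := by
  obtain ⟨x, y, z⟩ := caja
  simp only [rotacionesDistintas]
  by_cases hxy : x = y <;> by_cases hyz : y = z <;> by_cases hxz : x = z <;>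
    simp_all [PySem.Set.add, PySem.Set.contains, Prod.ext_iff]

-- B's filtered emission from a synchronized (res, seen) pair is A's Set.add fold
lemma inner_fold_eq (l : List (Int × Int × Int)) (res : List (Int × Int × Int)) :
    l.foldl (fun st r =>
        if PySem.Set.contains st.2 r then st else (st.1 ++ [r], PySem.Set.add st.2 r))
      (res, res) =
    (l.foldl PySem.Set.add res, l.foldl PySem.Set.add res) := by
  induction l generalizing res with
  | nil => rfl
  | cons r t ih =>
    simp only [List.foldl_cons, PySem.Set.contains, PySem.Set.add]
    by_cases hr : res.contains r
    · simp only [hr, if_pos]; exact ih res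
    · simp only [hr, Bool.false_eq_true, if_false]; exact ih (res ++ [r])

-- one stack: B's pair fold yields exactly A's per-stack dedup list
lemma stack_eq (pilas : List (Int × Int × Int)) :
    (pilas.foldl (fun (st : List (Int × Int × Int) × PySem.Set (Int × Int × Int)) caja =>
      (rotacionesDistintas caja).foldl (fun st r =>
        if PySem.Set.contains st.2 r then st else (st.1 ++ [r], PySem.Set.add st.2 r)) st)
      ([], PySem.Set.empty)).1 =
    pilas.foldl (fun cajas2 cajas =>
      let x := cajas.1; let y := cajas.2.1; let z := cajas.2.2
      let c1 := if cajas2.contains (x, y, z) then cajas2 else cajas2 ++ [(x, y, z)]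
      let c2 := if c1.contains (x, z, y) then c1 else c1 ++ [(x, z, y)]
      let c3 := if c2.contains (y, z, x) then c2 else c2 ++ [(y, z, x)]
      let c4 := if c3.contains (y, x, z) then c3 else c3 ++ [(y, x, z)]
      let c5 := if c4.contains (z, x, y) then c4 else c4 ++ [(z, x, y)]
      if c5.contains (z, y, x) then c5 else c5 ++ [(z, y, x)]) [] := by
  have main : ∀ (pilas : List (Int × Int × Int)) (res : List (Int × Int × Int)),
      pilas.foldl (fun (st : List (Int × Int × Int) × PySem.Set (Int × Int × Int)) caja =>
        (rotacionesDistintas caja).foldl (fun st r =>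
          if PySem.Set.contains st.2 r then st else (st.1 ++ [r], PySem.Set.add st.2 r)) st)
        (res, res) =
      (pilas.foldl (fun cajas2 caja => (rotacionesDistintas caja).foldl PySem.Set.add cajas2) res,
       pilas.foldl (fun cajas2 caja => (rotacionesDistintas caja).foldl PySem.Set.add cajas2) res) := by
    intro pilas
    induction pilas with
    | nil => intro res; rfl
    | cons caja t ih =>
      intro res
      simp only [List.foldl_cons]
      rw [inner_fold_eq]
      exact ih _
  rw [show (PySem.Set.empty : PySem.Set (Int × Int × Int)) = ([] : List (Int × Int × Int)) from rfl]
  rw [main pilas []]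
  apply PySem.List.foldl_congr_mem
  intro acc caja _
  rw [boxStep_eq_add_fold]
  exact (add_fold_congr (rotacionesDistintas_eq caja) acc).symm

-- ===== VERDICT =====
theorem cajasRotadas_spec : Claim_equal_cajasRotadas := by
  intro Tcajas _
  show cajasRotadas Tcajas = cajasRotadas_alt Tcajas
  unfold cajasRotadas cajasRotadas_alt
  rw [PySem.List.foldl_append_singleton_eq_map, PySem.List.foldl_append_singleton_eq_map]
  simp only [List.nil_append]
  exact List.map_congr_left (fun pilas _ => (stack_eq pilas).symm)
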